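-- pv_equiv track=rewrite | github.com/molmdl/EuL_scripts | conf-HSA/ana_code/sap2tsap/invert_tc.py | _excluded_pairs
-- ===== SOURCE A (Python) =====
-- def _excluded_pairs(adj, source, max_sep=3):
--     """
--     BFS from `source` up to `max_sep` bonds away.
--     Returns a set of atom indices (1-based) that are excluded from full
--     non-bonded interactions with `source` (i.e. 1,2 and 1,3 pairs).
--     With max_sep=3 this returns the 1,2 + 1,3 set; use max_sep=4 to also
--     include 1,4 scaled pairs.
--     """
--     visited = {source: 0}
--     queue = [source]
--     while queue:
--         node = queue.pop(0)
--         depth = visited[node]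
--         if depth >= max_sep:
--             continue
--         for nb in adj.get(node, set()):
--             if nb not in visited:
--                 visited[nb] = depth + 1
--                 queue.append(nb)
--     return set(visited.keys())
-- ===== SOURCE B (Python) =====
-- def _excluded_pairs(adj, source, max_sep=3):
--     """Fixed-point iteration instead of a BFS traversal: repeatedly apply the
--     one-step expansion operator grow(S) = dedup(S + neighbours of every member
--     of S) to the whole set, at most max_sep times, stopping when it no longer
--     grows.  No queue, no frontier, no per-node depth bookkeeping."""
--     pairs = [source]
--     for _ in range(max_sep):
--         grown = list(dict.fromkeys(
--             pairs + [nb for n in pairs for nb in adj.get(n, ())]))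
--         if len(grown) == len(pairs):
--             break
--         pairs = grown
--     return set(pairs)
-- ===== Notes on version B (the rewrite author's own statement) =====
-- stated objective: alternative
-- what changed: Replaces A's queue-based BFS (while-loop popping queue[0] with a node-to-depth dictionary checked against max_sep on every pop) by fixed-point iteration of a whole-set expansion operator: at most max_sep rounds of grown = dedup(pairs + neighbours of every member of pairs), stopping early when the set stops growing; no queue, no frontier, no depth bookkeeping.
import Mathlib
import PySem

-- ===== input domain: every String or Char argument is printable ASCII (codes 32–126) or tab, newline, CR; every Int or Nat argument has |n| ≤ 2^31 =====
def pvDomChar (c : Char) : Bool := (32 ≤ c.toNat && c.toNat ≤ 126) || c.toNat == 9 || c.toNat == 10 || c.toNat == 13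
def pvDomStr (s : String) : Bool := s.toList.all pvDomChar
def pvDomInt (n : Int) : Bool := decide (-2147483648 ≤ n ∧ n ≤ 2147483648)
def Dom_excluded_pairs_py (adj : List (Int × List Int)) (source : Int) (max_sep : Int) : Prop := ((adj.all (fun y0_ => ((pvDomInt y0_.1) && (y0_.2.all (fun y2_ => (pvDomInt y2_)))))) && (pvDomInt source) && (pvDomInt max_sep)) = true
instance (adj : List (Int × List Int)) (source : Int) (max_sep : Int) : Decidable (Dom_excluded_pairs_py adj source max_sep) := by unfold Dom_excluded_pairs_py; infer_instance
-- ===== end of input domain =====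

-- B replaces A's queue-based BFS with depth bookkeeping by fixed-point iteration of a
-- whole-set expansion operator (≤ max_sep rounds of dedup(pairs ++ all neighbours of
-- pairs), stopping when the set stops growing); objective: alternative algorithm.

-- ===== PORT A =====
-- body of A's inner 'for nb in adj.get(node, set())' loop
def epFA (depth : Int) (st : PySem.Dict Int Int × List Int) (nb : Int) :
    PySem.Dict Int Int × List Int :=
  if st.1.contains nb then st else (st.1.insert nb (depth + 1), st.2 ++ [nb])

-- A's 'while queue' loop.  fuel is only a totality guard: N + 2 (N = total length of
-- all neighbour lists) provably exceeds the number of iterations, since every pop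
-- beyond the first corresponds to a distinct node inserted into visited.
-- 'visited[node]' is ported as getD _ 0: node is always a key of visited (loop
-- invariant established in the proofs below), so Python's lookup never raises.
def epLoopA (adj : PySem.Dict Int (List Int)) (max_sep : Int) :
    Nat → PySem.Dict Int Int → List Int → PySem.Dict Int Int
  | 0, visited, _ => visited
  | fuel + 1, visited, queue =>
    match queue with
    | [] => visited
    | node :: rest =>
      let depth := visited.getD node 0
      if max_sep ≤ depth then epLoopA adj max_sep fuel visited rest
      else
        let st := (adj.getD node []).foldl (epFA depth) (visited, rest)
        epLoopA adj max_sep fuel st.1 st.2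

def excluded_pairs_py (adj : List (Int × List Int)) (source : Int) (max_sep : Int) : List Int :=
  let fuel := adj.foldl (fun a p => a + p.2.length) 0 + 2
  PySem.Set.ofList
    ((epLoopA (PySem.Dict.ofList adj) max_sep fuel
      ((PySem.Dict.empty).insert source 0) [source]).keys)

-- ===== PORT B =====
-- one round: grown = list(dict.fromkeys(pairs + [nb for n in pairs for nb in adj.get(n, ())]))
def epGrow (adjd : PySem.Dict Int (List Int)) (pairs : List Int) : List Int :=
  PySem.List.dedup (pairs ++ pairs.flatMap (fun n => adjd.getD n []))

-- B's 'for _ in range(max_sep)' loop with the early break when the set stops growing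
def epLoopB (adjd : PySem.Dict Int (List Int)) : Nat → List Int → List Int
  | 0, pairs => pairs
  | r + 1, pairs =>
    let grown := epGrow adjd pairs
    if grown.length = pairs.length then pairs else epLoopB adjd r grown

def excluded_pairs_py_alt (adj : List (Int × List Int)) (source : Int) (max_sep : Int) : List Int :=
  PySem.Set.ofList (epLoopB (PySem.Dict.ofList adj) max_sep.toNat [source])

-- ===== PRECONDITION & SPEC =====
def Spec_excluded_pairs_py (adj : List (Int × List Int)) (source : Int) (max_sep : Int) (out : List Int) : Prop := out = excluded_pairs_py_alt adj source max_sep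
instance (adj : List (Int × List Int)) (source : Int) (max_sep : Int) (out : List Int) : Decidable (Spec_excluded_pairs_py adj source max_sep out) := by unfold Spec_excluded_pairs_py; infer_instance

-- ===== CLAIM (what is proved, stated in full; the proofs are below) =====
def Claim_equal_excluded_pairs_py : Prop := ∀ (adj : List (Int × List Int)) (source : Int) (max_sep : Int), Dom_excluded_pairs_py adj source max_sep → Spec_excluded_pairs_py adj source max_sep (excluded_pairs_py adj source max_sep)

-- ===== LEMMAS AND PROOFS =====

-- proof-side helper: one level of a frontier-synchronized BFS, the intermediate
-- form through which A's queue loop and B's fixed-point loop are connected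
def epLevelH (adjd : PySem.Dict Int (List Int)) (st : PySem.Set Int × List Int) (n : Int) :
    PySem.Set Int × List Int :=
  (adjd.getD n []).foldl
    (fun st nb =>
      if PySem.Set.contains st.1 nb then st else (PySem.Set.add st.1 nb, st.2 ++ [nb])) st

-- proof-side helper: the level-synchronized BFS loop itself
def epLoopH (adjd : PySem.Dict Int (List Int)) : Nat → PySem.Set Int → List Int → PySem.Set Int
  | 0, visited, _ => visited
  | r + 1, visited, frontier =>
    if frontier.isEmpty then visited
    else
      let st := frontier.foldl (epLevelH adjd) (visited, [])
      epLoopH adjd r st.1 st.2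

-- contains on a Dict agrees with contains on its key list
theorem epContains_keys (V : PySem.Dict Int Int) (k : Int) :
    V.contains k = V.keys.contains k := by
  rw [PySem.Dict.contains_eq_decide_mem_keys]
  exact Eq.symm (List.contains_eq_mem k V.keys)

-- a key looked up in Dict.ofList comes from the association list
theorem epFoldIns_get? (l : List (Int × List Int)) :
    ∀ (d : PySem.Dict Int (List Int)) (k : Int) (v : List Int),
      (l.foldl (fun d p => d.insert p.1 p.2) d).get? k = some v →
      (k, v) ∈ l ∨ d.get? k = some v := by
  induction l with
  | nil => intro d k v h; exact Or.inr h
  | cons p l ih =>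
    intro d k v h
    rcases ih _ k v h with h' | h'
    · exact Or.inl (List.mem_cons_of_mem _ h')
    · rw [PySem.Dict.get?_insert] at h'
      by_cases hk : k = p.1
      · rw [if_pos hk] at h'
        refine Or.inl ?_
        have hv : v = p.2 := by simpa using h'.symm
        rw [hk, hv]
        exact List.mem_cons_self
      · rw [if_neg hk] at h'
        exact Or.inr h'

-- a key looked up in Dict.ofList comes from the association list
theorem epOfList_get?_mem (adj : List (Int × List Int)) (k : Int) (v : List Int)
    (h : (PySem.Dict.ofList adj).get? k = some v) : (k, v) ∈ adj := by
  have he : PySem.Dict.ofList adj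
      = adj.foldl (fun d p => d.insert p.1 p.2) PySem.Dict.empty := rfl
  rw [he] at h
  rcases epFoldIns_get? adj PySem.Dict.empty k v h with h' | h'
  · exact h'
  · simp [PySem.Dict.get?_empty] at h'

-- A's inner fold only appends to the queue; a common prefix passes through
theorem epInner_rel (d : Int) (nbs : List Int) (V : PySem.Dict Int Int) (P q : List Int) :
    nbs.foldl (epFA d) (V, P ++ q)
      = ((nbs.foldl (epFA d) (V, q)).1, P ++ (nbs.foldl (epFA d) (V, q)).2) := by
  induction nbs generalizing V q with
  | nil => simp
  | cons nb nbs ih =>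
    by_cases h : V.contains nb = true
    · simp only [List.foldl_cons, epFA, h, if_true]
      exact ih V q
    · simp only [List.foldl_cons, epFA, h, if_false, Bool.false_eq_true]
      rw [List.append_assoc]
      exact ih _ (q ++ [nb])

-- full description of one pass of A's inner neighbour loop
theorem epInner_spec (d : Int) (nbs : List Int) (V : PySem.Dict Int Int) (E : List Int) :
    ∃ new : List Int,
      (nbs.foldl (epFA d) (V, E)).2 = E ++ new ∧
      (nbs.foldl (epFA d) (V, E)).1.keys = V.keys ++ new ∧
      new.Nodup ∧
      (∀ x ∈ new, x ∈ nbs ∧ x ∉ V.keys) ∧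
      (∀ k v, V.get? k = some v → (nbs.foldl (epFA d) (V, E)).1.get? k = some v) ∧
      (∀ x ∈ new, (nbs.foldl (epFA d) (V, E)).1.get? x = some (d + 1)) := by
  induction nbs generalizing V E with
  | nil => exact ⟨[], by simp, by simp, List.nodup_nil, by simp, fun k v h => h, by simp⟩
  | cons nb nbs ih =>
    by_cases h : V.contains nb = true
    · simp only [List.foldl_cons, epFA, h, if_true]
      obtain ⟨new, h1, h2, h3, h4, h5, h6⟩ := ih V E
      exact ⟨new, h1, h2, h3,
        fun x hx => ⟨List.mem_cons_of_mem _ (h4 x hx).1, (h4 x hx).2⟩, h5, h6⟩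
    · have hnb : nb ∉ V.keys := by
        intro hm
        apply h
        rw [epContains_keys, List.contains_eq_mem]
        exact decide_eq_true hm
      have hkeys1 : (V.insert nb (d + 1)).keys = V.keys ++ [nb] :=
        PySem.Dict.keys_insert_of_not_contains V (d + 1) (by simpa using h)
      simp only [List.foldl_cons, epFA, h, if_false, Bool.false_eq_true]
      obtain ⟨new, h1, h2, h3, h4, h5, h6⟩ := ih (V.insert nb (d + 1)) (E ++ [nb])
      have hpres : ∀ (k : Int) (v : Int), V.get? k = some v →
          (V.insert nb (d + 1)).get? k = some v := by
        intro k v hk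
        have hkne : k ≠ nb := by
          intro he
          subst he
          rw [PySem.Dict.contains_eq_isSome_get?, hk] at h
          simp at h
        rw [PySem.Dict.get?_insert_of_ne V (d + 1) hkne]
        exact hk
      refine ⟨nb :: new, ?_, ?_, ?_, ?_, ?_, ?_⟩
      · rw [h1, List.append_assoc]; rfl
      · rw [h2, hkeys1, List.append_assoc]; rfl
      · refine List.nodup_cons.mpr ⟨?_, h3⟩
        intro hmem
        exact (h4 nb hmem).2 (by rw [hkeys1]; exact List.mem_append_right _ List.mem_cons_self)
      · intro x hx
        rcases List.mem_cons.mp hx with rfl | hx'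
        · exact ⟨List.mem_cons_self, hnb⟩
        · exact ⟨List.mem_cons_of_mem _ (h4 x hx').1,
            fun hk => (h4 x hx').2 (by rw [hkeys1]; exact List.mem_append_left _ hk)⟩
      · intro k v hk
        exact h5 k v (hpres k v hk)
      · intro x hx
        rcases List.mem_cons.mp hx with rfl | hx'
        · exact h5 x (d + 1) (PySem.Dict.get?_insert_self _ _ _)
        · exact h6 x hx'

-- the level fold (epLevelH's inner step) is A's inner fold seen through .keys
theorem epInner_AB (d : Int) (nbs : List Int)
    (V : PySem.Dict Int Int) (E : List Int) :
    nbs.foldl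
        (fun st nb =>
          if PySem.Set.contains st.1 nb then st else (PySem.Set.add st.1 nb, st.2 ++ [nb]))
        (V.keys, E)
      = ((nbs.foldl (epFA d) (V, E)).1.keys, (nbs.foldl (epFA d) (V, E)).2) := by
  induction nbs generalizing V E with
  | nil => simp
  | cons nb nbs ih =>
    have hc : PySem.Set.contains V.keys nb = V.contains nb := by
      rw [epContains_keys]; rfl
    by_cases h : V.contains nb = true
    · simp only [List.foldl_cons, epFA, hc, h, if_true]
      exact ih V E
    · have hkeys1 : (V.insert nb (d + 1)).keys = V.keys ++ [nb] :=
        PySem.Dict.keys_insert_of_not_contains V (d + 1) (by simpa using h)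
      have hadd : PySem.Set.add V.keys nb = V.keys ++ [nb] := by
        rw [PySem.Set.add]
        rw [show (PySem.Set.contains V.keys nb) = false by rw [hc]; simpa using h]
        simp
      simp only [List.foldl_cons, epFA, hc, h, if_false, Bool.false_eq_true]
      rw [hadd, ← hkeys1]
      exact ih (V.insert nb (d + 1)) (E ++ [nb])

-- the unvisited-neighbour budget drops by the number of freshly visited nodes
theorem epU_drop (base keys new : List Int) (hb : base.Nodup) (hn : new.Nodup)
    (h : ∀ x ∈ new, x ∈ base ∧ x ∉ keys) :
    (base.filter (fun x => !((keys ++ new).contains x))).length + new.length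
      ≤ (base.filter (fun x => !(keys.contains x))).length := by
  have hf : base.filter (fun x => !((keys ++ new).contains x))
      = (base.filter (fun x => !(keys.contains x))).filter (fun x => !(new.contains x)) := by
    rw [List.filter_filter]
    apply List.filter_congr
    intro x _
    by_cases h1 : x ∈ keys <;> by_cases h2 : x ∈ new <;>
      simp [List.contains_eq_mem, List.mem_append, h1, h2]
  set l' := base.filter (fun x => !(keys.contains x)) with hl'
  have hnd' : l'.Nodup := hb.filter _
  have hsplit : l'.length
      = (l'.filter (fun x => new.contains x)).length
        + (l'.filter (fun x => !(new.contains x))).length :=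
    List.length_eq_length_filter_add _
  have hcard : new.length ≤ (l'.filter (fun x => new.contains x)).length := by
    have hnd'' : (l'.filter (fun x => new.contains x)).Nodup := hnd'.filter _
    rw [← List.toFinset_card_of_nodup hn, ← List.toFinset_card_of_nodup hnd'']
    apply Finset.card_le_card
    intro x hx
    rw [List.mem_toFinset] at hx ⊢
    rw [List.mem_filter]
    refine ⟨?_, by simpa [List.contains_eq_mem] using hx⟩
    rw [hl', List.mem_filter]
    exact ⟨(h x hx).1, by simp [List.contains_eq_mem, (h x hx).2]⟩
  rw [hf]
  omega

-- once every queued node is at depth ≥ max_sep, A's loop only pops and skips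
theorem epSkipAll (adjd : PySem.Dict Int (List Int)) (max_sep : Int) (q : List Int) :
    ∀ (fuel : Nat) (V : PySem.Dict Int Int), (∀ n ∈ q, max_sep ≤ V.getD n 0) →
      epLoopA adjd max_sep fuel V q = V := by
  induction q with
  | nil => intro fuel V _; cases fuel <;> rfl
  | cons n q ih =>
    intro fuel V h
    cases fuel with
    | zero => rfl
    | succ fu =>
      show (if max_sep ≤ V.getD n 0 then epLoopA adjd max_sep fu V q
            else epLoopA adjd max_sep fu
              ((adjd.getD n []).foldl (epFA (V.getD n 0)) (V, q)).1
              ((adjd.getD n []).foldl (epFA (V.getD n 0)) (V, q)).2) = V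
      rw [if_pos (h n List.mem_cons_self)]
      exact ih fu V (fun m hm => h m (List.mem_cons_of_mem _ hm))

-- one whole BFS level, processed node by node by A and by the level fold
theorem epLevelStep (adjd : PySem.Dict Int (List Int)) (max_sep : Int) (base : List Int)
    (hsub : ∀ n x, x ∈ adjd.getD n [] → x ∈ base) (hb : base.Nodup) (d : Int)
    (hd : d < max_sep) :
    ∀ (F : List Int) (V : PySem.Dict Int Int) (E : List Int) (fuel : Nat),
      (∀ n ∈ F, V.get? n = some d) →
      (∀ n ∈ E, V.get? n = some (d + 1)) →
      F.length + E.length + (base.filter (fun x => !(V.keys.contains x))).length + 1 ≤ fuel →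
      ∃ (V' : PySem.Dict Int Int) (E' : List Int) (fuel' : Nat),
        epLoopA adjd max_sep fuel V (F ++ E) = epLoopA adjd max_sep fuel' V' E' ∧
        F.foldl (epLevelH adjd) (V.keys, E) = (V'.keys, E') ∧
        (∀ n ∈ E', V'.get? n = some (d + 1)) ∧
        E'.length + (base.filter (fun x => !(V'.keys.contains x))).length + 1 ≤ fuel' := by
  intro F
  induction F with
  | nil =>
    intro V E fuel hF hE hfuel
    exact ⟨V, E, fuel, by simp, by simp, hE, by simpa using hfuel⟩
  | cons n F' ih =>
    intro V E fuel hF hE hfuel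
    cases fuel with
    | zero => omega
    | succ fu =>
      have hget : V.get? n = some d := hF n List.mem_cons_self
      have hdep : V.getD n 0 = d := PySem.Dict.getD_of_get?_eq_some V 0 hget
      obtain ⟨new, h1, h2, h3, h4, h5, h6⟩ := epInner_spec d (adjd.getD n []) V E
      set V₁ := ((adjd.getD n []).foldl (epFA d) (V, E)).1 with hV₁
      have hU : (base.filter (fun x => !(V₁.keys.contains x))).length + new.length
          ≤ (base.filter (fun x => !(V.keys.contains x))).length := by
        rw [h2]
        exact epU_drop base V.keys new hb h3
          (fun x hx => ⟨hsub n x (h4 x hx).1, (h4 x hx).2⟩)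
      obtain ⟨V', E', fuel', ha, hb', he', hf'⟩ := ih V₁ (E ++ new) fu
        (fun m hm => h5 m d (hF m (List.mem_cons_of_mem _ hm)))
        (by
          intro m hm
          rcases List.mem_append.mp hm with hm' | hm'
          · exact h5 m (d + 1) (hE m hm')
          · exact h6 m hm')
        (by
          simp only [List.length_cons] at hfuel
          simp only [List.length_append]
          omega)
      refine ⟨V', E', fuel', ?_, ?_, he', hf'⟩
      · have hstep : epLoopA adjd max_sep (fu + 1) V ((n :: F') ++ E)
            = epLoopA adjd max_sep fu
              ((adjd.getD n []).foldl (epFA (V.getD n 0)) (V, F' ++ E)).1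
              ((adjd.getD n []).foldl (epFA (V.getD n 0)) (V, F' ++ E)).2 := by
          show (if max_sep ≤ V.getD n 0 then _ else _) = _
          rw [if_neg (by rw [hdep]; omega)]
          rfl
        rw [hstep, hdep, epInner_rel d _ V F' E, h1]
        exact ha
      · rw [List.foldl_cons]
        have hlev : epLevelH adjd (V.keys, E) n = (V₁.keys, E ++ new) := by
          rw [epLevelH]
          rw [epInner_AB d (adjd.getD n []) V E, ← hV₁, h1]
        rw [hlev]
        exact hb'

-- the BFS invariant: A's loop from a level boundary equals the remaining level loop
theorem epLevel (adjd : PySem.Dict Int (List Int)) (max_sep : Int) (base : List Int)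
    (hsub : ∀ n x, x ∈ adjd.getD n [] → x ∈ base) (hb : base.Nodup) :
    ∀ (r : Nat) (F : List Int) (V : PySem.Dict Int Int) (E : List Int) (d : Int) (fuel : Nat),
      (∀ n ∈ F, V.get? n = some d) →
      (∀ n ∈ E, V.get? n = some (d + 1)) →
      (max_sep - d).toNat = r + 1 →
      F.length + E.length + (base.filter (fun x => !(V.keys.contains x))).length + 1 ≤ fuel →
      (epLoopA adjd max_sep fuel V (F ++ E)).keys
        = epLoopH adjd r (F.foldl (epLevelH adjd) (V.keys, E)).1
            (F.foldl (epLevelH adjd) (V.keys, E)).2 := by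
  intro r
  induction r with
  | zero =>
    intro F V E d fuel hF hE hr hfuel
    have hd : d < max_sep := by omega
    obtain ⟨V', E', fuel', ha, hb2, he', hf'⟩ :=
      epLevelStep adjd max_sep base hsub hb d hd F V E fuel hF hE hfuel
    rw [ha, hb2]
    have hms : max_sep = d + 1 := by omega
    rw [epSkipAll adjd max_sep E' fuel' V'
      (fun n hn => by rw [PySem.Dict.getD_of_get?_eq_some V' 0 (he' n hn), hms])]
    rfl
  | succ r ihr =>
    intro F V E d fuel hF hE hr hfuel
    have hd : d < max_sep := by omega
    obtain ⟨V', E', fuel', ha, hb2, he', hf'⟩ :=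
      epLevelStep adjd max_sep base hsub hb d hd F V E fuel hF hE hfuel
    rw [ha, hb2]
    cases E' with
    | nil =>
      have hA : epLoopA adjd max_sep fuel' V' [] = V' := by cases fuel' <;> rfl
      rw [hA]
      rfl
    | cons x xs =>
      have hrec := ihr (x :: xs) V' [] (d + 1) fuel' he' (by simp) (by omega)
        (by simpa using hf')
      simp only [List.append_nil] at hrec
      rw [hrec]
      rfl

-- the list of genuinely new elements a sequence ys contributes against seen-set V
def epNew (V : List Int) : List Int → List Int
  | [] => []
  | y :: ys => if PySem.Set.contains V y then epNew V ys else y :: epNew (V ++ [y]) ys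

theorem epMemContains (V : List Int) (y : Int) : PySem.Set.contains V y = true ↔ y ∈ V := by
  simp

theorem epFoldAdd : ∀ (ys V : List Int), ys.foldl PySem.Set.add V = V ++ epNew V ys := by
  intro ys
  induction ys with
  | nil => intro V; simp [epNew]
  | cons y ys ih =>
    intro V
    rw [List.foldl_cons, epNew]
    by_cases h : PySem.Set.contains V y = true
    · rw [if_pos h, show PySem.Set.add V y = V by rw [PySem.Set.add, if_pos h]]
      exact ih V
    · rw [if_neg h, show PySem.Set.add V y = V ++ [y] by
        rw [PySem.Set.add, if_neg h]]
      rw [ih (V ++ [y]), List.append_assoc]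
      rfl

theorem epFoldInner : ∀ (ys V E : List Int),
    ys.foldl
        (fun st nb =>
          if PySem.Set.contains st.1 nb then st else (PySem.Set.add st.1 nb, st.2 ++ [nb]))
        (V, E)
      = (V ++ epNew V ys, E ++ epNew V ys) := by
  intro ys
  induction ys with
  | nil => intro V E; simp [epNew]
  | cons y ys ih =>
    intro V E
    rw [List.foldl_cons, epNew]
    by_cases h : PySem.Set.contains V y = true
    · rw [if_pos h]
      simp only [h, if_true]
      exact ih V E
    · simp only [h, Bool.false_eq_true, if_false]
      rw [show PySem.Set.add V y = V ++ [y] by rw [PySem.Set.add, if_neg h]]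
      rw [ih (V ++ [y]) (E ++ [y]), List.append_assoc, List.append_assoc]
      rfl

-- folding epLevelH over a frontier = folding the inner step over the flattened neighbours
theorem epLevelFold (adjd : PySem.Dict Int (List Int)) :
    ∀ (F : List Int) (st : PySem.Set Int × List Int),
      F.foldl (epLevelH adjd) st
        = (F.flatMap (fun n => adjd.getD n [])).foldl
            (fun st nb =>
              if PySem.Set.contains st.1 nb then st
              else (PySem.Set.add st.1 nb, st.2 ++ [nb])) st := by
  intro F
  induction F with
  | nil => intro st; simp
  | cons n F ih =>
    intro st
    rw [List.foldl_cons, List.flatMap_cons, List.foldl_append]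
    exact ih _

theorem epNew_append : ∀ (as bs V : List Int),
    epNew V (as ++ bs) = epNew V as ++ epNew (V ++ epNew V as) bs := by
  intro as
  induction as with
  | nil => intro bs V; simp [epNew]
  | cons a as ih =>
    intro bs V
    rw [List.cons_append, epNew, epNew]
    by_cases h : PySem.Set.contains V a = true
    · rw [if_pos h, if_pos h]
      exact ih bs V
    · rw [if_neg h, if_neg h, ih bs (V ++ [a]), List.cons_append, List.append_assoc]
      rfl

theorem epNew_nil_of_sub : ∀ (ys V : List Int), (∀ y ∈ ys, y ∈ V) → epNew V ys = [] := by
  intro ys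
  induction ys with
  | nil => intro V _; rfl
  | cons y ys ih =>
    intro V h
    rw [epNew, if_pos ((epMemContains V y).mpr (h y List.mem_cons_self))]
    exact ih V (fun z hz => h z (List.mem_cons_of_mem _ hz))

theorem epNew_id : ∀ (xs V : List Int), xs.Nodup → (∀ y ∈ xs, y ∉ V) → epNew V xs = xs := by
  intro xs
  induction xs with
  | nil => intro V _ _; rfl
  | cons x xs ih =>
    intro V hnd hdj
    have hx : PySem.Set.contains V x = true → False := fun hc =>
      hdj x List.mem_cons_self ((epMemContains V x).mp hc)
    rw [epNew, if_neg hx]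
    refine congrArg (x :: ·) (ih (V ++ [x]) (List.nodup_cons.mp hnd).2 ?_)
    intro y hy hmem
    rcases List.mem_append.mp hmem with h' | h'
    · exact hdj y (List.mem_cons_of_mem _ hy) h'
    · exact (List.nodup_cons.mp hnd).1 ((List.mem_singleton.mp h') ▸ hy)

theorem epNew_mem_self : ∀ (ys V : List Int) (y : Int), y ∈ ys → y ∈ V ++ epNew V ys := by
  intro ys
  induction ys with
  | nil => intro V y h; cases h
  | cons z ys ih =>
    intro V y h
    rw [epNew]
    by_cases hz : PySem.Set.contains V z = true
    · rw [if_pos hz]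
      rcases List.mem_cons.mp h with rfl | h'
      · exact List.mem_append_left _ ((epMemContains V y).mp hz)
      · exact ih V y h'
    · rw [if_neg hz]
      rcases List.mem_cons.mp h with rfl | h'
      · exact List.mem_append_right _ List.mem_cons_self
      · have := ih (V ++ [z]) y h'
        rw [List.append_assoc] at this
        simpa using this

theorem epNew_nodup : ∀ (ys V : List Int), V.Nodup → (V ++ epNew V ys).Nodup := by
  intro ys
  induction ys with
  | nil => intro V h; simpa [epNew] using h
  | cons y ys ih =>
    intro V h
    rw [epNew]
    by_cases hy : PySem.Set.contains V y = true
    · rw [if_pos hy]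
      exact ih V h
    · rw [if_neg hy]
      have hny : y ∉ V := fun hm => hy ((epMemContains V y).mpr hm)
      have hnd1 : (V ++ [y]).Nodup :=
        h.append (List.nodup_singleton y)
          (fun a ha hay => hny ((List.mem_singleton.mp hay) ▸ ha))
      have := ih (V ++ [y]) hnd1
      rw [List.append_assoc] at this
      simpa using this

-- one round of B's loop on a nodup, P-closed state
theorem epGrow_eq (adjd : PySem.Dict Int (List Int)) (P F : List Int)
    (hnd : (P ++ F).Nodup)
    (hcl : ∀ n ∈ P, ∀ x ∈ adjd.getD n [], x ∈ P ++ F) :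
    epGrow adjd (P ++ F)
      = (P ++ F) ++ epNew (P ++ F) (F.flatMap (fun n => adjd.getD n [])) := by
  have h1 : List.foldl PySem.Set.add [] (P ++ F) = P ++ F := by
    rw [epFoldAdd (P ++ F) [],
      epNew_id (P ++ F) [] hnd (fun y _ hm => List.not_mem_nil hm), List.nil_append]
  rw [epGrow, PySem.List.dedup_eq_ofList, PySem.Set.ofList_eq_foldl, List.foldl_append, h1,
    epFoldAdd]
  congr 1
  rw [List.flatMap_append, epNew_append]
  rw [epNew_nil_of_sub _ _ (by
    intro y hy
    obtain ⟨n, hn, hyn⟩ := List.mem_flatMap.mp hy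
    exact hcl n hn y hyn)]
  simp

theorem epLoopH_nil (adjd : PySem.Dict Int (List Int)) :
    ∀ (r : Nat) (V : PySem.Set Int), epLoopH adjd r V [] = V := by
  intro r V
  cases r <;> rfl

-- one-step equation forms of the two loops (definitional)
theorem epLoopH_succ (adjd : PySem.Dict Int (List Int)) (r : Nat) (V : PySem.Set Int)
    (F : List Int) :
    epLoopH adjd (r + 1) V F
      = if F.isEmpty then V
        else epLoopH adjd r (F.foldl (epLevelH adjd) (V, [])).1
          (F.foldl (epLevelH adjd) (V, [])).2 := rfl

theorem epLoopB_succ (adjd : PySem.Dict Int (List Int)) (r : Nat) (pairs : List Int) :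
    epLoopB adjd (r + 1) pairs
      = if (epGrow adjd pairs).length = pairs.length then pairs
        else epLoopB adjd r (epGrow adjd pairs) := rfl

-- the bridge: the level loop equals B's fixed-point loop on a nodup, P-closed state
theorem epBridge (adjd : PySem.Dict Int (List Int)) :
    ∀ (r : Nat) (P F : List Int), (P ++ F).Nodup →
      (∀ n ∈ P, ∀ x ∈ adjd.getD n [], x ∈ P ++ F) →
      epLoopH adjd r (P ++ F) F = epLoopB adjd r (P ++ F) := by
  intro r
  induction r with
  | zero => intro P F _ _; rfl
  | succ r ih =>
    intro P F hnd hcl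
    have hgrow := epGrow_eq adjd P F hnd hcl
    rw [epLoopH_succ, epLoopB_succ]
    cases F with
    | nil =>
      rw [if_pos (by simp)]
      have hnew0 : epNew (P ++ ([] : List Int))
          (([] : List Int).flatMap (fun n => adjd.getD n [])) = [] := by
        simp [epNew]
      rw [if_pos (by rw [hgrow, hnew0, List.append_nil])]
    | cons f fs =>
      rw [if_neg (by simp)]
      set new := epNew (P ++ (f :: fs)) ((f :: fs).flatMap (fun n => adjd.getD n []))
        with hnewdef
      have hst : (f :: fs).foldl (epLevelH adjd) (P ++ (f :: fs), [])
          = ((P ++ (f :: fs)) ++ new, new) := by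
        rw [epLevelFold, epFoldInner]
        rfl
      rw [hst]
      have hcl' : ∀ n ∈ (P ++ (f :: fs)), ∀ x ∈ adjd.getD n [],
          x ∈ (P ++ (f :: fs)) ++ new := by
        intro n hn x hx
        rcases List.mem_append.mp hn with hn' | hn'
        · exact List.mem_append_left _ (hcl n hn' x hx)
        · have : x ∈ (f :: fs).flatMap (fun m => adjd.getD m []) :=
            List.mem_flatMap.mpr ⟨n, hn', hx⟩
          exact epNew_mem_self _ _ _ this
      have hnd' : ((P ++ (f :: fs)) ++ new).Nodup := epNew_nodup _ _ hnd
      cases hne : new with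
      | nil =>
        rw [if_pos (by rw [hgrow, hne]; simp)]
        simpa using epLoopH_nil adjd r ((P ++ (f :: fs)) ++ ([] : List Int))
      | cons m ms =>
        rw [if_neg (by rw [hgrow, hne]; simp)]
        rw [hgrow]
        have := ih (P ++ (f :: fs)) new (by rw [hne] at hnd' ⊢; exact hnd')
          (by rw [hne] at hcl' ⊢; exact hcl')
        rw [hne] at this ⊢
        exact this

-- ===== VERDICT (by name: the statement is the Claim_ definition above) =====
theorem excluded_pairs_py_spec : Claim_equal_excluded_pairs_py := by
  intro adj source max_sep _
  unfold Spec_excluded_pairs_py excluded_pairs_py excluded_pairs_py_alt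
  have hkeys0 : ((PySem.Dict.empty : PySem.Dict Int Int).insert source 0).keys = [source] := rfl
  have hget0 : ((PySem.Dict.empty : PySem.Dict Int Int).insert source 0).get? source
      = some 0 := PySem.Dict.get?_insert_self PySem.Dict.empty source 0
  show PySem.Set.ofList
      ((epLoopA (PySem.Dict.ofList adj) max_sep (adj.foldl (fun a p => a + p.2.length) 0 + 2)
        ((PySem.Dict.empty).insert source 0) [source]).keys)
    = PySem.Set.ofList (epLoopB (PySem.Dict.ofList adj) max_sep.toNat [source])
  refine congrArg PySem.Set.ofList ?_
  by_cases hms : max_sep ≤ 0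
  · have hA1 : epLoopA (PySem.Dict.ofList adj) max_sep
        (adj.foldl (fun a p => a + p.2.length) 0 + 2)
        ((PySem.Dict.empty).insert source 0) [source]
        = (PySem.Dict.empty).insert source 0 :=
      epSkipAll _ _ _ _ _ (by
        intro n hn
        rw [List.mem_singleton.mp hn,
          PySem.Dict.getD_of_get?_eq_some (PySem.Dict.empty.insert source 0) 0 hget0]
        omega)
    rw [hA1, hkeys0, show max_sep.toNat = 0 by omega]
    rfl
  · set base : List Int := (adj.map (fun p => p.2)).flatten.dedup with hbase
    have hsub : ∀ n x, x ∈ (PySem.Dict.ofList adj).getD n [] → x ∈ base := by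
      intro n x hx
      rcases hg : (PySem.Dict.ofList adj).get? n with _ | v
      · rw [PySem.Dict.getD_eq_get?_getD, hg] at hx
        simp at hx
      · rw [PySem.Dict.getD_eq_get?_getD, hg] at hx
        simp only [Option.getD_some] at hx
        rw [hbase, List.mem_dedup]
        exact List.mem_flatten.mpr ⟨v,
          List.mem_map.mpr ⟨(n, v), epOfList_get?_mem adj n v hg, rfl⟩, hx⟩
    have hUbound : (base.filter
        (fun x => !((((PySem.Dict.empty : PySem.Dict Int Int).insert source 0).keys).contains x))).length
        ≤ adj.foldl (fun a p => a + p.2.length) 0 := by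
      calc (base.filter _).length ≤ base.length := List.length_filter_le _ _
        _ ≤ (adj.map (fun p => p.2)).flatten.length := (List.dedup_sublist _).length_le
        _ = adj.foldl (fun a p => a + p.2.length) 0 := by
            rw [List.length_flatten, List.map_map, PySem.List.foldl_add_nat]
            simp [Function.comp_def]
    have hlev := epLevel (PySem.Dict.ofList adj) max_sep base hsub (List.nodup_dedup _)
      (max_sep.toNat - 1) [source] ((PySem.Dict.empty).insert source 0) [] 0
      (adj.foldl (fun a p => a + p.2.length) 0 + 2)
      (by intro n hn; rw [List.mem_singleton.mp hn]; exact hget0)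
      (by simp)
      (by omega)
      (by simp only [List.length_singleton, List.length_nil]; omega)
    simp only [List.append_nil] at hlev
    have hH : (epLoopA (PySem.Dict.ofList adj) max_sep
          (adj.foldl (fun a p => a + p.2.length) 0 + 2)
          ((PySem.Dict.empty).insert source 0) [source]).keys
        = epLoopH (PySem.Dict.ofList adj) max_sep.toNat [source] [source] := by
      rw [hlev, hkeys0, show max_sep.toNat = (max_sep.toNat - 1) + 1 by omega]
      rfl
    have hB := epBridge (PySem.Dict.ofList adj) max_sep.toNat [] [source]
      (by simp) (by simp)
    simp only [List.nil_append] at hB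
    rw [hH, hB]
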